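-- pv_equiv track=rewrite | github.com/barrard/pyStocks | data_process.py | consecutiveDown
-- ===== SOURCE A (Python) =====
-- def consecutiveDown(days):
--     count = 0
--     for n in days:
--
--         if n < 0:
--             count = count+1
--         else:
--             count = 0
--     return count
-- ===== SOURCE B (Python) =====
-- def consecutiveDown(days):
--     data = list(days)
--     count = 0
--     for n in reversed(data):
--         if n < 0:
--             count += 1
--         else:
--             break
--     return count
-- ===== Notes on version B (the rewrite author's own statement) =====
-- stated objective: alternative
-- what changed: B scans the list backwards from the end, counting negatives and breaking at the first non-negative, instead of A's forward pass that resets a counter on every non-negative value.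
import Mathlib
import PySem

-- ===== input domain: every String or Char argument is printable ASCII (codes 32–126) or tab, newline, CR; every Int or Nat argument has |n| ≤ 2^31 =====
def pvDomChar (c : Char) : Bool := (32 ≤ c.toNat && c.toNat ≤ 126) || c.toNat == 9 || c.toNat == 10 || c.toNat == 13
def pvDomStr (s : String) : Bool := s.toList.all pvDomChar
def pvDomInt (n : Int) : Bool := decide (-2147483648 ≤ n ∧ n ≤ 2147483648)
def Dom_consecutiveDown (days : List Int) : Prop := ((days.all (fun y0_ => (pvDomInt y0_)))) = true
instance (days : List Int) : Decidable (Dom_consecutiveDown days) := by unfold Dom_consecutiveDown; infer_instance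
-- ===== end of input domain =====

-- ===== PORT A =====
-- B: backwards scan with early break, instead of A's forward scan with counter reset (objective: alternative, same cost).
def consecutiveDown (days : List Int) : Int :=
  days.foldl (fun count n => if n < 0 then count + 1 else 0) 0

-- ===== PORT B =====
-- helper: count leading negatives, stop at first non-negative (the 'break')
def cdCountRev : List Int → Int
  | [] => 0
  | n :: rest => if n < 0 then cdCountRev rest + 1 else 0

def consecutiveDown_alt (days : List Int) : Int :=
  cdCountRev days.reverse

-- ===== PRECONDITION & SPEC =====
def Spec_consecutiveDown (days : List Int) (out : Int) : Prop := out = consecutiveDown_alt days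
instance (days : List Int) (out : Int) : Decidable (Spec_consecutiveDown days out) := by unfold Spec_consecutiveDown; infer_instance

-- ===== CLAIM (what is proved, stated in full; the proofs are below) =====
def Claim_equal_consecutiveDown : Prop := ∀ (days : List Int), Dom_consecutiveDown days → Spec_consecutiveDown days (consecutiveDown days)

-- ===== LEMMAS AND PROOFS =====

-- ===== VERDICT (by name: the statement is the Claim_ definition above) =====
theorem cd_eq (days : List Int) : days.foldl (fun count n => if n < 0 then count + 1 else 0) 0 = cdCountRev days.reverse := by
  induction days using List.reverseRecOn with
  | nil => rfl
  | append_singleton xs n ih =>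
      rw [List.foldl_append, List.reverse_append]
      simp only [List.foldl_cons, List.foldl_nil, List.reverse_singleton, List.singleton_append,
        cdCountRev]
      split <;> simp [ih]

theorem consecutiveDown_spec : Claim_equal_consecutiveDown := by
  intro days _
  show consecutiveDown days = consecutiveDown_alt days
  exact cd_eq days
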